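-- pv_equiv track=rewrite | github.com/DemonicOFFICAL/telegram_bot_for_logistic | code.py | cheking_code
-- ===== SOURCE A (Python) =====
-- def cheking_code(code):
--     '''
--     cheking_code - функция для проверки кода посылки
--         вход:
--             code - код, полученный от пользователя
--         выход:
--             Булевое значение
--     '''
--     def get_control_sum(code):
--         '''
--         get_control_sum - рекурсивная функция получения контрольной суммы
--             вход:
--                 code - код, полученный от пользователя
--             выход:
--                 n - контрольная сумма
--         '''
--         code = str(code)
--         n = sum([int(i) for i in code])
--         if n > 9:
--             n = get_control_sum(n)
--         return str(n)
--
--     if (code[:2] == '38') and (get_control_sum(code) == code[3]):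
--         return True
--     else:
--         return False
-- ===== SOURCE B (Python) =====
-- def cheking_code(code):
--     '''
--     cheking_code - parcel-code check: '38' prefix and control sum equal to code[3].
--     '''
--     if code[:2] != '38':
--         return False
--     s = sum(int(i) for i in code)
--     root = 0 if s == 0 else 1 + (s - 1) % 9
--     return str(root) == code[3]
-- ===== Notes on version B (the rewrite author's own statement) =====
-- stated objective: idiomatic
-- what changed: Replaced the recursive repeated digit-summing helper get_control_sum with a single digit-sum pass followed by the closed-form digital root 1 + (s - 1) % 9, flattening the recursion entirely.
import Mathlib
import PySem

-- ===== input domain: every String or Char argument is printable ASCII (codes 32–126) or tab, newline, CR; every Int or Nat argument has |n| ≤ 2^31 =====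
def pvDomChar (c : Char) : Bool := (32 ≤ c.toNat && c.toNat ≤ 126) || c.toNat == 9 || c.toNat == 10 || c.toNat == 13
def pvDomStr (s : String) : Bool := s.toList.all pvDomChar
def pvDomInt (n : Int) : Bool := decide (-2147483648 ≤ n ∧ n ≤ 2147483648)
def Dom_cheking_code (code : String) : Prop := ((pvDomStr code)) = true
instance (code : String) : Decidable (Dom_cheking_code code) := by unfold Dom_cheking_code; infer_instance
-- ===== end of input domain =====

-- B replaces A's recursive repeated digit-summing with the closed-form digital root 1 + (s-1) % 9 (idiomatic; same cost).

-- ===== PORT A =====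

-- int(i) for a one-character string i (Python raises ValueError on a non-digit; getD 0 is never
-- reached inside Pre_, where every character is a digit)
def pvDigit (c : Char) : Int := (PySem.Int.ofStr? (String.singleton c)).getD 0

-- sum([int(i) for i in code])
def pvDigitSum (cs : List Char) : Int := (cs.map pvDigit).sum

-- termination facts for the port's recursion (cited by decreasing_by, hence above the port)
lemma pvDigit_digitChar (d : Nat) (h : d < 10) : pvDigit (Nat.digitChar d) = (d : Int) := by
  interval_cases d <;> decide

lemma sum_toDigitsCore (fuel : Nat) : ∀ (n : Nat) (acc : List Char), n < fuel →
    ((Nat.toDigitsCore 10 fuel n acc).map pvDigit).sum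
      = ((Nat.digits 10 n).sum : Int) + (acc.map pvDigit).sum := by
  induction fuel with
  | zero => intro n acc h; omega
  | succ f ih =>
    intro n acc h
    rw [Nat.toDigitsCore]
    by_cases h0 : n / 10 = 0
    · have hn : n < 10 := by omega
      simp only [h0, if_pos, List.map_cons, List.sum_cons,
        pvDigit_digitChar (n % 10) (by omega)]
      rcases Nat.eq_zero_or_pos n with h1 | h1
      · subst h1; simp
      · rw [Nat.digits_def' (by norm_num : (1:ℕ) < 10) h1, h0]
        simp [Nat.mod_eq_of_lt hn]
    · rw [if_neg h0]
      have h1 : 0 < n := by omega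
      have h2 : n / 10 < f := by
        have := Nat.div_lt_self h1 (by norm_num : 1 < 10)
        omega
      rw [ih (n / 10) _ h2]
      rw [Nat.digits_def' (by norm_num : (1:ℕ) < 10) h1]
      simp [pvDigit_digitChar (n % 10) (by omega)]
      ring

lemma pvDigitSum_toChars (n : Int) :
    pvDigitSum (PySem.Int.toChars n) = ((Nat.digits 10 n.natAbs).sum : Int) := by
  unfold pvDigitSum PySem.Int.toChars
  split_ifs with h
  · rw [Nat.toDigits]
    simp only [List.map_cons, List.sum_cons]
    rw [sum_toDigitsCore (n.natAbs + 1) n.natAbs [] (by omega)]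
    have : pvDigit '-' = 0 := by decide
    simp [this]
  · have ht : n.toNat = n.natAbs := by omega
    rw [Nat.toDigits, ht, sum_toDigitsCore (n.natAbs + 1) n.natAbs [] (by omega)]
    simp

lemma digits_sum_lt (m : Nat) (h : 10 ≤ m) : (Nat.digits 10 m).sum < m := by
  rw [Nat.digits_def' (by norm_num : (1:ℕ) < 10) (by omega)]
  have h2 := Nat.digit_sum_le 10 (m / 10)
  simp only [List.sum_cons]
  omega

-- get_control_sum applied to an int n (the recursive calls): str(n), sum its digits, recurse while > 9
def getControlSumInt (n : Int) : String :=
  if h : pvDigitSum (PySem.Int.toChars n) > 9 then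
    getControlSumInt (pvDigitSum (PySem.Int.toChars n))
  else
    PySem.Int.toStr (pvDigitSum (PySem.Int.toChars n))
termination_by n.natAbs
decreasing_by
  rw [pvDigitSum_toChars] at h ⊢
  have h10 : 10 ≤ n.natAbs := by
    have := Nat.digit_sum_le 10 n.natAbs
    omega
  have := digits_sum_lt n.natAbs h10
  omega

-- get_control_sum applied to the original string (str(code) = code)
def getControlSum (code : String) : String :=
  if pvDigitSum code.toList > 9 then getControlSumInt (pvDigitSum code.toList)
  else PySem.Int.toStr (pvDigitSum code.toList)

def cheking_code (code : String) : Bool :=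
  if PySem.Str.slice code none (some 2) = "38" then
    match PySem.Str.pyGet? code 3 with
    | some c => decide (getControlSum code = String.singleton c)
    | none => false
  else false

-- ===== PORT B =====
def cheking_code_alt (code : String) : Bool :=
  if PySem.Str.slice code none (some 2) ≠ "38" then false
  else
    let s := pvDigitSum code.toList
    let root : Int := if s = 0 then 0 else 1 + PySem.Int.mod (s - 1) 9
    match PySem.Str.pyGet? code 3 with
    | some c => decide (PySem.Int.toStr root = String.singleton c)
    | none => false

-- ===== PRECONDITION & SPEC =====
-- Pre_ excludes exactly the inputs where A raises (and B raises identically): a code that passes the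
-- two-character prefix test but contains a non-digit character (ValueError in int) or is shorter than
-- four characters (IndexError on the fourth character).
def Pre_cheking_code (code : String) : Prop :=
  PySem.Str.slice code none (some 2) = "38" →
    (code.toList.all Char.isDigit = true ∧ 4 ≤ code.toList.length)
instance (code : String) : Decidable (Pre_cheking_code code) := by unfold Pre_cheking_code; infer_instance
def pvWitness_cheking_code : String := "3842"

def Spec_cheking_code (code : String) (out : Bool) : Prop := out = cheking_code_alt code
instance (code : String) (out : Bool) : Decidable (Spec_cheking_code code out) := by unfold Spec_cheking_code; infer_instance

-- ===== CLAIM (what is proved, stated in full; the proofs are below) =====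
def Claim_equal_cheking_code : Prop := ∀ (code : String), Dom_cheking_code code → Pre_cheking_code code → Spec_cheking_code code (cheking_code code)

-- ===== LEMMAS AND PROOFS =====

lemma digits_sum_pos (m : Nat) (h : 1 ≤ m) : 1 ≤ (Nat.digits 10 m).sum := by
  rcases Nat.eq_zero_or_pos (Nat.digits 10 m).sum with h0 | h0
  · exfalso
    have hne : Nat.digits 10 m ≠ [] := Nat.digits_ne_nil_iff_ne_zero.mpr (by omega)
    have hlast := Nat.getLast_digit_ne_zero 10 (show m ≠ 0 by omega)
    have hmem := List.getLast_mem hne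
    exact hlast (List.sum_eq_zero_iff.mp h0 _ hmem)
  · omega

lemma pvDigit_of_isDigit (c : Char) (h : c.isDigit = true) :
    pvDigit c = ((c.toNat : Int) - 48) := by
  have h1 : 48 ≤ c.toNat ∧ c.toNat ≤ 57 := by simp [Char.isDigit] at h; exact ⟨h.1, h.2⟩
  have hv : c.toNat = 48 ∨ c.toNat = 49 ∨ c.toNat = 50 ∨ c.toNat = 51 ∨ c.toNat = 52 ∨
      c.toNat = 53 ∨ c.toNat = 54 ∨ c.toNat = 55 ∨ c.toNat = 56 ∨ c.toNat = 57 := by omega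
  rw [← Char.ofNat_toNat c]
  rcases hv with h | h | h | h | h | h | h | h | h | h <;> rw [h] <;> decide

-- characterisation of A's recursion: for n ≥ 1 it computes the digital root 1 + (n-1) % 9
lemma getControlSumInt_eq : ∀ (k : Nat) (n : Int), n.natAbs ≤ k → 1 ≤ n →
    getControlSumInt n = PySem.Int.toStr (1 + (n - 1) % 9) := by
  intro k
  induction k with
  | zero => intro n hk h1; omega
  | succ k ih =>
    intro n hk h1
    rw [getControlSumInt]
    have hmod := Nat.modEq_nine_digits_sum n.natAbs
    unfold Nat.ModEq at hmod
    split_ifs with hgt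
    · rw [pvDigitSum_toChars] at hgt ⊢
      have h10 : 10 ≤ n.natAbs := by
        have := Nat.digit_sum_le 10 n.natAbs
        omega
      have hlt := digits_sum_lt n.natAbs h10
      rw [ih ((Nat.digits 10 n.natAbs).sum : Int) (by omega) (by omega)]
      congr 1
      omega
    · rw [pvDigitSum_toChars] at hgt ⊢
      have hpos := digits_sum_pos n.natAbs (by omega)
      congr 1
      omega

-- ===== VERDICT (by name: the statement is the Claim_ definition above) =====
theorem cheking_code_spec : Claim_equal_cheking_code := by
  intro code _ hpre
  unfold Spec_cheking_code cheking_code cheking_code_alt getControlSum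
  by_cases hs : PySem.Str.slice code none (some 2) = "38"
  · obtain ⟨hdig, -⟩ := hpre hs
    have htake : code.toList.take 2 = ['3', '8'] := by
      have := congrArg String.toList hs
      simpa [pysem] using this
    -- the digit sum is at least 3 + 8
    have hs11 : 11 ≤ pvDigitSum code.toList := by
      rcases hl : code.toList with _ | ⟨a, _ | ⟨b, rest⟩⟩ <;> rw [hl] at htake <;> simp at htake
      obtain ⟨ha, hb⟩ := htake
      subst ha; subst hb
      have hrest : 0 ≤ (rest.map pvDigit).sum := by
        apply List.sum_nonneg
        intro x hx
        obtain ⟨c, hc, rfl⟩ := List.mem_map.mp hx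
        have hcd : c.isDigit = true := List.all_eq_true.mp hdig c (by rw [hl]; simp [hc])
        rw [pvDigit_of_isDigit c hcd]
        have hb : 48 ≤ c.toNat ∧ c.toNat ≤ 57 := by
          simp [Char.isDigit] at hcd; exact ⟨hcd.1, hcd.2⟩
        omega
      have h3 : pvDigit '3' = 3 := by decide
      have h8 : pvDigit '8' = 8 := by decide
      simp only [pvDigitSum, List.map_cons, List.sum_cons, h3, h8]
      omega
    rw [getControlSumInt_eq (pvDigitSum code.toList).natAbs _ le_rfl (by omega)]
    have hs0 : ¬ pvDigitSum code.toList = 0 := by omega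
    have hgt : pvDigitSum code.toList > 9 := by omega
    simp [hs, hs0, hgt]
  · simp [hs]
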